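-- pv_equiv track=rewrite | github.com/lounesbbkr/-hash- | deteles.py | md_compres
-- ===== SOURCE A (Python) =====
-- def md_compres(text, key):
--     # Convert text and key to binary strings
--     text_binary = ''.join(format(ord(c), '08b') for c in text)
--     key_binary = ''.join(format(ord(c), '08b') for c in key)
--
--     # Calculer le nombre de zéros de remplissage nécessaires
--     padding_zeros = (len(key_binary) - len(text_binary) % len(key_binary)) % len(key_binary)
--
--     # Ajouter les zéros de remplissage au texte
--     text_binary += '0' * padding_zeros
--
--     # Diviser le texte en blocs de la taille de la clé
--     blocks = [text_binary[i:i+len(key_binary)] for i in range(0, len(text_binary), len(key_binary))]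
--
--     # Effectuer le XOR entre les blocs
--     result = ""
--     for i in range(len(blocks)):
--         block_xor = ""
--         for j in range(len(blocks[i])):
--             block_xor += str(int(blocks[i][j]) ^ int(key_binary[(j + i) % len(key_binary)]))
--         result += block_xor
--
--     # Pad the result to a length of 256 bits
--     result = result[:256].ljust(256, '0')
--
--     return result
-- ===== SOURCE B (Python) =====
-- def md_compres(text, key):
--     # Arithmetic re-implementation: build the keystream by concatenating slice-rotations
--     # of the key, then XOR the whole padded message against it as one big integer.
--     tb = ''.join(format(ord(c), '08b') for c in text)
--     kb = ''.join(format(ord(c), '08b') for c in key)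
--     L = len(kb)
--     tb += '0' * ((L - len(tb) % L) % L)
--     nblocks = len(tb) // L
--     ks = ''.join(kb[i % L:] + kb[:i % L] for i in range(nblocks))
--     n = len(tb)
--     res = format(int(tb, 2) ^ int(ks, 2), 'b').zfill(n) if n else ''
--     return res[:256].ljust(256, '0')
-- ===== Notes on version B (the rewrite author's own statement) =====
-- stated objective: faster
-- what changed: B replaces A's block-splitting and per-bit nested loops (with per-bit int()/str() and string +=) by an arithmetic scheme: it builds the keystream by concatenating slice-rotations of the key (kb[i%L:]+kb[:i%L]) and XORs the entire padded message against it as one big-integer operation (int(tb,2)^int(ks,2)), reformatted with format(...,'b').zfill(n).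
import Mathlib
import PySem

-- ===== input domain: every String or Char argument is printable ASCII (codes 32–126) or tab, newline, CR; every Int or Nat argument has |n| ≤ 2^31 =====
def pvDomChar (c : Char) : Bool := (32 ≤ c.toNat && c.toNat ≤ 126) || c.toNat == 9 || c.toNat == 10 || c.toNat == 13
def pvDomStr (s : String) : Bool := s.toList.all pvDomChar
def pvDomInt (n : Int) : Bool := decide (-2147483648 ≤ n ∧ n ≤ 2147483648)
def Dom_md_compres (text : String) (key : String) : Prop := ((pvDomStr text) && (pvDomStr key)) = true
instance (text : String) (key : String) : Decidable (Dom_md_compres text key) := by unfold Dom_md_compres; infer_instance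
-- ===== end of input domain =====

-- B builds the keystream from slice-rotations of the key and XORs the whole padded message
-- against it as one big integer instead of A's block-splitting nested per-bit loop (measured faster).

-- ===== PORT A =====
-- format(ord(c), '08b') for an ASCII char: exact for codes < 256
def pvBits8 (n : Nat) : List Char :=
  (List.range 8).map (fun k => if n.testBit (7 - k) then '1' else '0')

-- ''.join(format(ord(c), '08b') for c in s)
def pvToBin (s : String) : List Char := s.toList.flatMap (fun c => pvBits8 c.toNat)

-- int(c) for a '0'/'1' character (exact on that domain)
def pvBitVal (c : Char) : Nat := if c = '1' then 1 else 0
-- str(n) for n ∈ {0,1} (exact on that domain)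
def pvBitChr (n : Nat) : Char := if n = 1 then '1' else '0'

def md_compres (text : String) (key : String) : String :=
  let tb0 := pvToBin text
  let kb := pvToBin key
  let L := kb.length
  if L = 0 then "" -- Python raises ZeroDivisionError here; excluded by Pre_
  else
    let tb := tb0 ++ List.replicate ((L - tb0.length % L) % L) '0'
    let blocks := (PySem.List.pyRange 0 (tb.length : Int) (L : Int)).map
      (fun i => PySem.List.slice tb (some i) (some (i + (L : Int))))
    let result := (List.range blocks.length).foldl (fun result i =>
      let blk := blocks.getD i []
      let block_xor := (List.range blk.length).foldl (fun bx j =>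
        bx ++ [pvBitChr (pvBitVal (blk.getD j '0') ^^^ pvBitVal (kb.getD ((j + i) % L) '0'))]) []
      result ++ block_xor) []
    String.mk (result.take 256 ++ List.replicate (256 - (result.take 256).length) '0')

-- ===== PORT B =====
-- int(s, 2) on a '0'/'1' string (exact on that domain)
def pvOfBits (l : List Char) : Nat := l.foldl (fun a c => 2 * a + (if c = '1' then 1 else 0)) 0

-- binary digits of x, most-significant first, no leading zeros; fuel-encoded division loop
-- (fuel = x suffices since x ≥ 1 → x / 2 < x)
def pvGo : Nat → Nat → List Char
  | 0, _ => []
  | fuel + 1, x => if x = 0 then [] else pvGo fuel (x / 2) ++ [if x % 2 = 1 then '1' else '0']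

-- format(x, 'b') for a nonnegative integer (exact on Nat)
def pvNatToBin (x : Nat) : List Char := if x = 0 then ['0'] else pvGo x x

def md_compres_alt (text : String) (key : String) : String :=
  let tb0 := pvToBin text
  let kb := pvToBin key
  let L := kb.length
  if L = 0 then "" -- ZeroDivisionError in B as well; excluded by Pre_
  else
    let tb := tb0 ++ List.replicate ((L - tb0.length % L) % L) '0'
    let nblocks := tb.length / L
    let ks := (List.range nblocks).flatMap (fun i =>
      PySem.List.slice kb (some ((i % L : Nat) : Int)) none ++
      PySem.List.slice kb none (some ((i % L : Nat) : Int)))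
    let n := tb.length
    let res := if n ≠ 0 then
        let d := pvNatToBin (pvOfBits tb ^^^ pvOfBits ks)
        List.replicate (n - d.length) '0' ++ d   -- .zfill(n)
      else []
    String.mk (res.take 256 ++ List.replicate (256 - (res.take 256).length) '0')

-- ===== PRECONDITION & SPEC =====
-- Pre_ excludes only the empty key, on which A (and B) raise ZeroDivisionError.
def Pre_md_compres (text : String) (key : String) : Prop := key ≠ ""
instance (text : String) (key : String) : Decidable (Pre_md_compres text key) := by
  unfold Pre_md_compres; infer_instance

def pvWitness_md_compres : String × String := ("hi", "k")

def Spec_md_compres (text : String) (key : String) (out : String) : Prop := out = md_compres_alt text key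
instance (text : String) (key : String) (out : String) : Decidable (Spec_md_compres text key out) := by unfold Spec_md_compres; infer_instance

-- ===== CLAIM (what is proved, stated in full; the proofs are below) =====
def Claim_equal_md_compres : Prop := ∀ (text : String) (key : String), Dom_md_compres text key → Pre_md_compres text key → Spec_md_compres text key (md_compres text key)

-- ===== LEMMAS AND PROOFS =====

theorem pv_length_toBin (s : String) : (pvToBin s).length = 8 * s.toList.length := by
  unfold pvToBin
  induction s.toList with
  | nil => simp
  | cons c cs ih => simp [pvBits8]; ring

theorem pv_toBin_binary (s : String) : ∀ c ∈ pvToBin s, c = '0' ∨ c = '1' := by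
  intro c hc
  simp only [pvToBin, List.mem_flatMap] at hc
  obtain ⟨a, -, hm⟩ := hc
  simp only [pvBits8, List.mem_map] at hm
  obtain ⟨k, -, hk⟩ := hm
  split at hk <;> simp [← hk]

theorem pv_getD_map_range {α : Type} (f : Nat → α) (m i : Nat) (d : α) (h : i < m) :
    ((List.range m).map f).getD i d = f i := by
  simp [List.getD, h]

theorem pv_flat_range {α : Type} (m L : Nat) (F : Nat → α) :
    (List.range m).flatMap (fun i => (List.range L).map (fun j => F (L * i + j)))
      = (List.range (m * L)).map F := by
  induction m with
  | zero => simp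
  | succ m ih =>
    rw [List.range_succ, List.flatMap_append, ih, Nat.succ_mul, List.range_add, List.map_append]
    simp [List.map_map, Function.comp, Nat.mul_comm]

theorem pv_bit_eq (a b : Char) (ha : a = '0' ∨ a = '1') (hb : b = '0' ∨ b = '1') :
    pvBitChr (pvBitVal a ^^^ pvBitVal b) = if a ≠ b then '1' else '0' := by
  rcases ha with rfl | rfl <;> rcases hb with rfl | rfl <;> decide

theorem pv_flatMap_congr {α β : Type} {l : List α} {f g : α → List β}
    (h : ∀ a ∈ l, f a = g a) : l.flatMap f = l.flatMap g := by
  induction l with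
  | nil => rfl
  | cons x xs ih =>
    simp only [List.flatMap_cons]
    rw [h x (by simp), ih (fun a ha => h a (by simp [ha]))]

theorem pv_pad_dvd (n L : Nat) (hL : 0 < L) : L ∣ n + (L - n % L) % L := by
  apply Nat.dvd_of_mod_eq_zero
  rcases Nat.eq_zero_or_pos (n % L) with h0 | hpos
  · rw [h0, Nat.sub_zero, Nat.mod_self, Nat.add_zero]
    exact h0
  · have hmlt : n % L < L := Nat.mod_lt n hL
    have hlt : L - n % L < L := by omega
    rw [Nat.mod_eq_of_lt hlt, Nat.add_mod, Nat.mod_eq_of_lt hlt]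
    have hsum : n % L + (L - n % L) = L := by omega
    rw [hsum, Nat.mod_self]

theorem pv_blocks_eq (tb : List Char) (L : Nat) (hL : 0 < L) (hdvd : L ∣ tb.length) :
    (PySem.List.pyRange 0 (tb.length : Int) (L : Int)).map
        (fun i => PySem.List.slice tb (some i) (some (i + (L : Int))))
      = (List.range (tb.length / L)).map (fun k => (tb.drop (L * k)).take L) := by
  obtain ⟨m, hm⟩ := hdvd
  rw [PySem.List.pyRange_of_pos _ _ (by exact_mod_cast hL)]
  have hcnt : (if (0 : Int) < (tb.length : Int) then
      (((tb.length : Int) - 0 + (L : Int) - 1) / (L : Int)).toNat else 0) = m := by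
    rcases Nat.eq_zero_or_pos tb.length with h0 | hpos
    · have hm0 : m = 0 := by
        rw [h0] at hm
        exact (Nat.mul_eq_zero.mp hm.symm).resolve_left (by omega)
      simp [h0, hm0]
    · rw [if_pos (by exact_mod_cast hpos)]
      have hcast : ((tb.length : Int) - 0 + (L : Int) - 1) = ((tb.length + L - 1 : Nat) : Int) := by
        omega
      rw [hcast, ← Int.natCast_div, Int.toNat_natCast, hm]
      have hsplit : L * m + L - 1 = L * m + (L - 1) := by omega
      rw [hsplit, Nat.mul_add_div hL]
      have : (L - 1) / L = 0 := Nat.div_eq_of_lt (by omega)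
      omega
  rw [hcnt, List.map_map]
  have hmdiv : tb.length / L = m := by rw [hm, Nat.mul_div_cancel_left _ hL]
  rw [hmdiv]
  apply List.map_congr_left
  intro k _
  simp only [Function.comp]
  have h1 : (0 : Int) + (L : Int) * (k : Int) = ((L * k : Nat) : Int) := by push_cast; ring
  rw [h1]
  exact PySem.List.slice_natCast_add tb (L * k) L

theorem pv_getD_take_drop (tb : List Char) (L i j : Nat) (hj : j < L)
    (hlen : L * i + L ≤ tb.length) :
    ((tb.drop (L * i)).take L).getD j '0' = tb.getD (L * i + j) '0' := by
  have h1 : j < ((tb.drop (L * i)).take L).length := by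
    simp [List.length_take, List.length_drop]; omega
  have h2 : L * i + j < tb.length := by omega
  rw [List.getD_eq_getElem _ _ h1, List.getD_eq_getElem _ _ h2]
  rw [List.getElem_take, List.getElem_drop]

-- A's nested foldl over blocks equals a single map over global bit positions.
theorem pv_core (tb kb : List Char) (hbt : ∀ c ∈ tb, c = '0' ∨ c = '1')
    (hbk : ∀ c ∈ kb, c = '0' ∨ c = '1') (hL : 0 < kb.length) (hdvd : kb.length ∣ tb.length) :
    (List.range (tb.length / kb.length)).foldl (fun result i =>
      result ++ (List.range (((List.range (tb.length / kb.length)).map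
          (fun k => (tb.drop (kb.length * k)).take kb.length)).getD i []).length).foldl
        (fun bx j => bx ++ [pvBitChr (pvBitVal ((((List.range (tb.length / kb.length)).map
            (fun k => (tb.drop (kb.length * k)).take kb.length)).getD i []).getD j '0')
          ^^^ pvBitVal (kb.getD ((j + i) % kb.length) '0'))]) []) []
    = (List.range tb.length).map (fun p =>
        if tb.getD p '0' ≠ kb.getD ((p % kb.length + p / kb.length) % kb.length) '0' then '1' else '0') := by
  set L := kb.length with hLdef
  set m := tb.length / L with hmdef
  simp only [PySem.List.foldl_append_singleton_eq_map, List.nil_append]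
  rw [PySem.List.foldl_append_eq_flatMap, List.nil_append]
  have hml : m * L = tb.length := Nat.div_mul_cancel hdvd
  rw [← hml, ← pv_flat_range m L _]
  apply pv_flatMap_congr
  intro i hi
  rw [List.mem_range] at hi
  have hbound : L * i + L ≤ tb.length := by
    calc L * i + L = (i + 1) * L := by ring
    _ ≤ m * L := Nat.mul_le_mul_right _ hi
    _ = tb.length := hml
  rw [pv_getD_map_range _ m i [] hi]
  have hblen : ((tb.drop (L * i)).take L).length = L := by
    simp only [List.length_take, List.length_drop]
    omega
  rw [hblen]
  apply List.map_congr_left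
  intro j hj
  rw [List.mem_range] at hj
  rw [pv_getD_take_drop tb L i j hj hbound]
  have hmem_t : tb.getD (L * i + j) '0' ∈ tb := by
    rw [List.getD_eq_getElem _ _ (by omega)]
    exact List.getElem_mem _
  have hmem_k : kb.getD ((j + i) % L) '0' ∈ kb := by
    rw [List.getD_eq_getElem _ _ (Nat.mod_lt _ hL)]
    exact List.getElem_mem _
  rw [pv_bit_eq _ _ (hbt _ hmem_t) (hbk _ hmem_k)]
  have hmod : (L * i + j) % L = j := by
    rw [Nat.mul_add_mod]
    exact Nat.mod_eq_of_lt hj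
  have hdiv : (L * i + j) / L = i := by
    rw [Nat.mul_add_div hL, Nat.div_eq_of_lt hj, Nat.add_zero]
  simp only [hmod, hdiv]

-- ---- B-side lemmas ----

theorem pv_ofBits_append_singleton (l : List Char) (c : Char) :
    pvOfBits (l ++ [c]) = 2 * pvOfBits l + (if c = '1' then 1 else 0) := by
  simp [pvOfBits, List.foldl_append]

theorem pv_go_fuel (f1 : Nat) : ∀ f2 x, x ≤ f1 → x ≤ f2 → pvGo f1 x = pvGo f2 x := by
  induction f1 with
  | zero =>
    intro f2 x h1 _
    have : x = 0 := Nat.le_zero.mp h1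
    subst this
    cases f2 <;> simp [pvGo]
  | succ f ih =>
    intro f2 x h1 h2
    by_cases hx : x = 0
    · subst hx; cases f2 <;> simp [pvGo]
    · have hx1 : 1 ≤ x := Nat.one_le_iff_ne_zero.mpr hx
      obtain ⟨f2', rfl⟩ : ∃ f2', f2 = f2' + 1 := ⟨f2 - 1, by omega⟩
      simp only [pvGo, if_neg hx]
      have hhalf : x / 2 < x := Nat.div_lt_self (by omega) (by omega)
      rw [ih f2' (x / 2) (by omega) (by omega)]

-- pvGo at sufficient fuel computes the canonical binary digits: it inverts pvOfBits
-- up to leading zeros.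
theorem pv_go_ofBits (l : List Char) (hb : ∀ c ∈ l, c = '0' ∨ c = '1') :
    pvGo (pvOfBits l) (pvOfBits l) = l.dropWhile (· = '0') := by
  induction l using List.reverseRecOn with
  | nil => simp [pvOfBits, pvGo]
  | append_singleton t c ih =>
    have hbt : ∀ x ∈ t, x = '0' ∨ x = '1' := fun x hx => hb x (by simp [hx])
    have hbc : c = '0' ∨ c = '1' := hb c (by simp)
    have ih' := ih hbt
    rw [pv_ofBits_append_singleton, List.dropWhile_append]
    by_cases hv : pvOfBits t = 0
    · have hdrop : t.dropWhile (· = '0') = [] := by rw [← ih', hv]; simp [pvGo]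
      rw [hdrop]
      simp only [List.isEmpty_nil, if_true]
      rcases hbc with rfl | rfl
      · simp [hv, pvGo, List.dropWhile]
      · simp [hv, pvGo, List.dropWhile]
    · have hv1 : 1 ≤ pvOfBits t := Nat.one_le_iff_ne_zero.mpr hv
      set v := pvOfBits t with hvdef
      set b : Nat := if c = '1' then 1 else 0 with hbdef
      have hb2 : b < 2 := by rw [hbdef]; split <;> omega
      have hne : 2 * v + b ≠ 0 := by omega
      have hstep : pvGo (2 * v + b) (2 * v + b)
          = pvGo (2 * v + b - 1) ((2 * v + b) / 2) ++ [if (2 * v + b) % 2 = 1 then '1' else '0'] := by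
        obtain ⟨f, hf⟩ : ∃ f, 2 * v + b = f + 1 := ⟨2 * v + b - 1, by omega⟩
        rw [hf]; simp only [pvGo, if_neg (by omega : f + 1 ≠ 0)]
        congr 2 <;> omega
      have hdiv : (2 * v + b) / 2 = v := by omega
      have hmod : (2 * v + b) % 2 = b := by omega
      have hchar : (if (2 * v + b) % 2 = 1 then '1' else '0') = c := by
        rw [hmod, hbdef]
        rcases hbc with rfl | rfl <;> simp
      rw [hstep, hdiv, hchar,
        pv_go_fuel (2 * v + b - 1) v v (by omega) (le_refl _), ih']
      have hdropne : t.dropWhile (· = '0') ≠ [] := by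
        intro h
        rw [← ih'] at h
        obtain ⟨v', hv'⟩ : ∃ v', v = v' + 1 := ⟨v - 1, by omega⟩
        rw [hv'] at h
        simp [pvGo] at h
      rw [if_neg (by simpa [List.isEmpty_iff] using hdropne)]

theorem pv_xor_two_mul (a b u v : Nat) (hu : u < 2) (hv : v < 2) :
    (2 * a + u) ^^^ (2 * b + v) = 2 * (a ^^^ b) + (u ^^^ v) := by
  have huv : u ^^^ v < 2 := by interval_cases u <;> interval_cases v <;> decide
  apply Nat.eq_of_testBit_eq
  intro k
  cases k with
  | zero =>
    rw [Nat.testBit_xor]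
    simp only [Nat.testBit_zero]
    have h1 : (2 * a + u) % 2 = u := by omega
    have h2 : (2 * b + v) % 2 = v := by omega
    have h3 : (2 * (a ^^^ b) + (u ^^^ v)) % 2 = u ^^^ v := by omega
    rw [h1, h2, h3]
    interval_cases u <;> interval_cases v <;> decide
  | succ k =>
    rw [Nat.testBit_xor]
    simp only [Nat.testBit_add_one]
    have h1 : (2 * a + u) / 2 = a := by omega
    have h2 : (2 * b + v) / 2 = b := by omega
    have h3 : (2 * (a ^^^ b) + (u ^^^ v)) / 2 = a ^^^ b := by omega
    rw [h1, h2, h3, Nat.testBit_xor]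

-- XOR of the two big integers is the big integer of the pointwise XOR string.
theorem pv_ofBits_xor (tb : List Char) : ∀ ks : List Char, tb.length = ks.length →
    (∀ c ∈ tb, c = '0' ∨ c = '1') → (∀ c ∈ ks, c = '0' ∨ c = '1') →
    pvOfBits tb ^^^ pvOfBits ks
      = pvOfBits (List.zipWith (fun a b => if a ≠ b then '1' else '0') tb ks) := by
  induction tb using List.reverseRecOn with
  | nil =>
    intro ks hlen _ _
    have : ks = [] := List.eq_nil_of_length_eq_zero hlen.symm
    subst this; simp [pvOfBits]
  | append_singleton t c ih =>
    intro ks hlen hbt hbk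
    have hksne : ks ≠ [] := by
      intro h; subst h; simp at hlen
    obtain ⟨s, d, rfl⟩ : ∃ s d, ks = s ++ [d] :=
      ⟨ks.dropLast, ks.getLast hksne, (List.dropLast_append_getLast hksne).symm⟩
    have hlen' : t.length = s.length := by simpa using hlen
    have hbt' : ∀ x ∈ t, x = '0' ∨ x = '1' := fun x hx => hbt x (by simp [hx])
    have hbs' : ∀ x ∈ s, x = '0' ∨ x = '1' := fun x hx => hbk x (by simp [hx])
    have hc : c = '0' ∨ c = '1' := hbt c (by simp)
    have hd : d = '0' ∨ d = '1' := hbk d (by simp)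
    rw [List.zipWith_append hlen']
    simp only [List.zipWith_cons_cons, List.zipWith_nil_right]
    rw [pv_ofBits_append_singleton, pv_ofBits_append_singleton, pv_ofBits_append_singleton,
      pv_xor_two_mul _ _ _ _ (by split <;> omega) (by split <;> omega),
      ← ih s hlen' hbt' hbs']
    congr 1
    rcases hc with rfl | rfl <;> rcases hd with rfl | rfl <;> decide

-- zfill(n) ∘ format(·,'b') is a left inverse of int(·,2) on nonempty '0'/'1' strings.
theorem pv_zfill_ofBits (l : List Char) (hne : l ≠ []) (hb : ∀ c ∈ l, c = '0' ∨ c = '1') :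
    List.replicate (l.length - (pvNatToBin (pvOfBits l)).length) '0' ++ pvNatToBin (pvOfBits l)
      = l := by
  by_cases hv : pvOfBits l = 0
  · have hdrop : l.dropWhile (· = '0') = [] := by
      rw [← pv_go_ofBits l hb, hv]; simp [pvGo]
    have hall : ∀ c ∈ l, c = '0' := by
      intro c hc
      by_contra hne0
      have : l.dropWhile (· = '0') ≠ [] := by
        intro h
        have := List.takeWhile_append_dropWhile (p := (· = '0')) (l := l)
        rw [h, List.append_nil] at this
        have hc' : c ∈ l.takeWhile (· = '0') := by rw [this]; exact hc
        exact hne0 (by simpa using List.mem_takeWhile_imp hc')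
      exact this hdrop
    have hrep : l = List.replicate l.length '0' := List.eq_replicate_of_mem hall
    have hbin0 : pvNatToBin 0 = ['0'] := rfl
    rw [hv, hbin0]
    have hlen : 1 ≤ l.length := by
      cases l with
      | nil => exact absurd rfl hne
      | cons a t => simp
    conv_rhs => rw [hrep]
    rw [show l.length = (l.length - 1) + 1 by omega, List.replicate_succ']
    simp
  · simp only [pvNatToBin, if_neg hv]
    rw [pv_go_ofBits l hb]
    have hsplit := List.takeWhile_append_dropWhile (p := (· = '0')) (l := l)
    have htake : l.takeWhile (· = '0') = List.replicate (l.takeWhile (· = '0')).length '0' :=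
      List.eq_replicate_of_mem (fun c hc => by simpa using List.mem_takeWhile_imp hc)
    have hlen : l.length - (l.dropWhile (· = '0')).length = (l.takeWhile (· = '0')).length := by
      have := congrArg List.length hsplit
      simp only [List.length_append] at this
      omega
    rw [hlen, ← htake, hsplit]

theorem pv_zipWith_eq_map_range {α β γ : Type} (f : α → β → γ) (a : List α) (b : List β)
    (d1 : α) (d2 : β) (h : a.length = b.length) :
    List.zipWith f a b = (List.range a.length).map (fun p => f (a.getD p d1) (b.getD p d2)) := by
  apply List.ext_getElem
  · simp [List.length_zipWith, h]
  · intro i h1 h2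
    simp only [List.length_zipWith, h, Nat.min_self] at h1
    have hia : i < a.length := by omega
    have hib : i < b.length := by omega
    simp [List.getElem_zipWith, hia, hib]

-- one slice-rotation of the key, as a map over range
theorem pv_rot_eq (kb : List Char) (r : Nat) (hr : r < kb.length) :
    kb.drop r ++ kb.take r
      = (List.range kb.length).map (fun j => kb.getD ((r + j) % kb.length) '0') := by
  apply List.ext_getElem
  · simp; omega
  · intro j h1 h2
    simp only [List.length_append, List.length_drop, List.length_take] at h1
    have hj : j < kb.length := by omega
    rw [List.getElem_map, List.getElem_range]
    by_cases hcase : j < kb.length - r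
    · rw [List.getElem_append_left (by simp; omega)]
      rw [List.getElem_drop]
      have hmod : (r + j) % kb.length = r + j := Nat.mod_eq_of_lt (by omega)
      rw [hmod, List.getD_eq_getElem _ _ (by omega)]
    · rw [List.getElem_append_right (by simp; omega)]
      have hmod : (r + j) % kb.length = r + j - kb.length := by
        have hlt : r + j - kb.length < kb.length := by omega
        have heq : r + j = (r + j - kb.length) + 1 * kb.length := by omega
        conv_lhs => rw [heq]
        rw [Nat.add_mul_mod_self_right]
        exact Nat.mod_eq_of_lt hlt
      rw [List.getElem_take]
      rw [hmod, List.getD_eq_getElem _ _ (by omega)]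
      congr 1
      simp only [List.length_drop]
      omega

-- the concatenated keystream, bit by bit
theorem pv_ks_eq (kb : List Char) (m : Nat) (hL : 0 < kb.length) :
    (List.range m).flatMap (fun i =>
        PySem.List.slice kb (some ((i % kb.length : Nat) : Int)) none ++
        PySem.List.slice kb none (some ((i % kb.length : Nat) : Int)))
      = (List.range (m * kb.length)).map
          (fun p => kb.getD ((p % kb.length + p / kb.length) % kb.length) '0') := by
  set L := kb.length with hLdef
  rw [← pv_flat_range m L _]
  apply pv_flatMap_congr
  intro i hi
  rw [PySem.List.slice_from_natCast, PySem.List.slice_to_natCast]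
  rw [pv_rot_eq kb (i % L) (Nat.mod_lt _ hL)]
  apply List.map_congr_left
  intro j hj
  rw [List.mem_range] at hj
  have hmod : (L * i + j) % L = j := by
    rw [Nat.mul_add_mod]; exact Nat.mod_eq_of_lt hj
  have hdiv : (L * i + j) / L = i := by
    rw [Nat.mul_add_div hL, Nat.div_eq_of_lt hj, Nat.add_zero]
  rw [hmod, hdiv]
  rw [show (i % L + j) % L = (j + i) % L from by rw [Nat.mod_add_mod, Nat.add_comm]]

theorem pv_ks_getD (kb : List Char) (m p : Nat) (hp : p < m * kb.length) :
    ((List.range (m * kb.length)).map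
        (fun q => kb.getD ((q % kb.length + q / kb.length) % kb.length) '0')).getD p '0'
      = kb.getD ((p % kb.length + p / kb.length) % kb.length) '0' :=
  pv_getD_map_range _ _ _ _ hp

-- ===== VERDICT (by name: the statement is the Claim_ definition above) =====
theorem md_compres_spec : Claim_equal_md_compres := by
  intro text key _ hpre
  simp only [Spec_md_compres, md_compres, md_compres_alt]
  have hkey : key.toList ≠ [] := fun h => hpre (by rwa [← String.toList_eq_nil_iff])
  have hL : 0 < (pvToBin key).length := by
    rw [pv_length_toBin]
    cases h : key.toList with
    | nil => exact absurd h hkey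
    | cons a l => simp
  have hne : ¬ ((pvToBin key).length = 0) := by omega
  rw [if_neg hne, if_neg hne]
  set kb := pvToBin key with hkb
  set L := kb.length with hLdef
  set tb := pvToBin text ++ List.replicate ((L - (pvToBin text).length % L) % L) '0' with htb
  have hdvd : L ∣ tb.length := by
    rw [htb, List.length_append, List.length_replicate]
    exact pv_pad_dvd _ _ hL
  have hbt : ∀ c ∈ tb, c = '0' ∨ c = '1' := by
    intro c hc
    rcases List.mem_append.mp hc with h | h
    · exact pv_toBin_binary _ _ h
    · exact Or.inl (List.eq_of_mem_replicate h)
  have hbk : ∀ c ∈ kb, c = '0' ∨ c = '1' := pv_toBin_binary key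
  -- A's side: the nested block loops collapse to one map over bit positions
  rw [pv_blocks_eq _ _ hL hdvd]
  simp only [List.length_map, List.length_range]
  rw [pv_core _ _ hbt hbk hL hdvd]
  -- B's side
  by_cases hn : tb.length = 0
  · rw [if_neg (not_not_intro hn), hn]
    simp only [List.range_zero, List.map_nil, List.take_nil, List.nil_append, List.length_nil]
  · rw [if_pos hn]
    set m := tb.length / L with hm
    have hml : m * L = tb.length := Nat.div_mul_cancel hdvd
    rw [pv_ks_eq kb m hL]
    set ks := (List.range (m * L)).map
      (fun p => kb.getD ((p % L + p / L) % L) '0') with hks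
    have hkslen : ks.length = tb.length := by rw [hks]; simp [hml]
    -- the big-integer XOR is the pointwise XOR string …
    have hbks : ∀ c ∈ ks, c = '0' ∨ c = '1' := by
      intro c hc
      rw [hks] at hc
      obtain ⟨q, -, rfl⟩ := List.mem_map.mp hc
      by_cases hq : (q % L + q / L) % L < kb.length
      · rw [List.getD_eq_getElem _ _ hq]
        exact hbk _ (List.getElem_mem _)
      · rw [List.getD_eq_default _ _ (by omega)]
        exact Or.inl rfl
    rw [pv_ofBits_xor tb ks hkslen.symm hbt hbks]
    -- … which is exactly A's map over bit positions
    have hMA : List.zipWith (fun a b => if a ≠ b then '1' else '0') tb ks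
        = (List.range tb.length).map (fun p =>
            if tb.getD p '0' ≠ kb.getD ((p % L + p / L) % L) '0' then '1' else '0') := by
      rw [pv_zipWith_eq_map_range _ tb ks '0' '0' hkslen.symm]
      apply List.map_congr_left
      intro p hp
      rw [List.mem_range] at hp
      rw [hks, pv_ks_getD kb m p (by have h := hml; simp only [hLdef] at h ⊢; omega)]
    rw [hMA]
    set M := (List.range tb.length).map (fun p =>
        if tb.getD p '0' ≠ kb.getD ((p % L + p / L) % L) '0' then '1' else '0') with hM
    have hMlen : M.length = tb.length := by rw [hM]; simp
    have hMne : M ≠ [] := by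
      intro h; rw [h] at hMlen; simp at hMlen; omega
    have hbM : ∀ c ∈ M, c = '0' ∨ c = '1' := by
      intro c hc
      rw [hM] at hc
      obtain ⟨q, -, rfl⟩ := List.mem_map.mp hc
      split <;> simp
    have hz := pv_zfill_ofBits M hMne hbM
    rw [hMlen] at hz
    rw [hz]
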